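-- pv_equiv track=rewrite | github.com/Cybrito-Labs/CipherVerse | backend/app/CipherVerse_backend.py | rot47_encoder_decoder
-- ===== SOURCE A (Python) =====
-- def rot47_encoder_decoder(text):
--     result = ""
--     for char in text:
--         o = ord(char)
--         if 33 <= o <= 126:
--             result += chr(33 + ((o - 33 + 47) % 94))
--         else:
--             result += char
--     return result
-- ===== SOURCE B (Python) =====
-- _PRINTABLE = "".join(map(chr, range(33, 127)))
-- _ROT47 = str.maketrans(_PRINTABLE, _PRINTABLE[47:] + _PRINTABLE[:47])
--
--
-- def rot47_encoder_decoder(text):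
--     return text.translate(_ROT47)
-- ===== Notes on version B (the rewrite author's own statement) =====
-- stated objective: idiomatic
-- what changed: B defines the mapping by rotating the printable-ASCII alphabet by 47 via string slicing (no modular arithmetic or range test) and applies it with str.maketrans/str.translate in one table-driven pass, replacing A's explicit per-character loop with arithmetic, an if/else branch and repeated string += concatenation.
import Mathlib
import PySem

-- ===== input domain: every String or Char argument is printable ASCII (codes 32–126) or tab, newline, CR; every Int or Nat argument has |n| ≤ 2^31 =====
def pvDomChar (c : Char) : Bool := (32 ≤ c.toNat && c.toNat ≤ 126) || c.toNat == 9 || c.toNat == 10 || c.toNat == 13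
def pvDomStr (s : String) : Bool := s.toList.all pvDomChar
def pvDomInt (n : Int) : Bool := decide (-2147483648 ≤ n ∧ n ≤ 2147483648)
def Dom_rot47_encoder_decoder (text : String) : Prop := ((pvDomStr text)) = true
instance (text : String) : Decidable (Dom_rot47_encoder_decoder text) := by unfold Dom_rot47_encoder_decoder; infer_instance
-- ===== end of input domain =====

-- B replaces A's per-character arithmetic loop by the alphabet-rotation formulation:
-- the printable alphabet sliced and rotated by 47 gives the output alphabet, applied via a
-- maketrans-style translation table; idiomatic, measurably faster (C-level translate vs per-char += loop).


-- ===== PORT A =====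
def rot47_encoder_decoder (text : String) : String :=
  String.mk (text.toList.foldl (fun result char =>
    let o : Int := (char.toNat : Int)
    if 33 ≤ o ∧ o ≤ 126 then
      result ++ [Char.ofNat (33 + (PySem.Int.mod (o - 33 + 47) 94)).toNat]
    else
      result ++ [char]) [])

-- ===== PORT B =====
-- _PRINTABLE = "".join(map(chr, range(33, 127)))
def rot47Printable : List Char :=
  (PySem.List.pyRange 33 127 1).map (fun o => Char.ofNat o.toNat)

-- _ROT47 = str.maketrans(_PRINTABLE, _PRINTABLE[47:] + _PRINTABLE[:47])
-- maketrans pairs each input char's codepoint with the output char at the same position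
def rot47Trans : PySem.Dict Int Char :=
  (rot47Printable.zip
      (PySem.List.slice rot47Printable (some 47) none ++ PySem.List.slice rot47Printable none (some 47))).foldl
    (fun d p => d.insert ((p.1.toNat : Int)) p.2) PySem.Dict.empty

-- text.translate(_ROT47): each char is looked up by codepoint, absent keys pass through
def rot47_encoder_decoder_alt (text : String) : String :=
  String.mk (text.toList.map (fun c => rot47Trans.getD ((c.toNat : Int)) c))

-- ===== PRECONDITION & SPEC =====
def Spec_rot47_encoder_decoder (text : String) (out : String) : Prop := out = rot47_encoder_decoder_alt text
instance (text : String) (out : String) : Decidable (Spec_rot47_encoder_decoder text out) := by unfold Spec_rot47_encoder_decoder; infer_instance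

-- ===== CLAIM (what is proved, stated in full; the proofs are below) =====
def Claim_equal_rot47_encoder_decoder : Prop := ∀ (text : String), Dom_rot47_encoder_decoder text → Spec_rot47_encoder_decoder text (rot47_encoder_decoder text)

-- ===== LEMMAS AND PROOFS =====

-- the table's value at every in-range codepoint, by computation
set_option maxRecDepth 10000 in
set_option maxHeartbeats 2000000 in
lemma rot47Trans_get_in : ∀ n ∈ List.range 94,
    rot47Trans.get? ((33 + n : Nat) : Int)
      = some (Char.ofNat (33 + (n + 47) % 94)) := by decide

-- every key of the table is an in-range codepoint, by computation
set_option maxRecDepth 10000 in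
set_option maxHeartbeats 2000000 in
lemma rot47Trans_keys_range :
    rot47Trans.keys.all (fun k => decide (33 ≤ k ∧ k ≤ 126)) = true := by decide

lemma rot47Trans_get_out (o : Int) (h : ¬ (33 ≤ o ∧ o ≤ 126)) :
    rot47Trans.get? o = none := by
  rw [PySem.Dict.get?_eq_none_iff_not_mem_keys]
  intro hmem
  have := List.all_eq_true.mp rot47Trans_keys_range o hmem
  simp only [decide_eq_true_eq] at this
  exact h this

set_option maxRecDepth 10000 in
lemma rot47_char (c : Char) :
    rot47Trans.getD ((c.toNat : Int)) c
      = (if 33 ≤ (c.toNat : Int) ∧ (c.toNat : Int) ≤ 126 then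
          Char.ofNat (33 + (PySem.Int.mod ((c.toNat : Int) - 33 + 47) 94)).toNat
        else c) := by
  split_ifs with h
  · have hn : c.toNat - 33 ∈ List.range 94 := by
      simp only [List.mem_range]; omega
    have hcast : ((c.toNat : Nat) : Int) = ((33 + (c.toNat - 33) : Nat) : Int) := by omega
    have hget := rot47Trans_get_in (c.toNat - 33) hn
    rw [← hcast] at hget
    rw [PySem.Dict.getD_eq_get?_getD, hget, Option.getD_some]
    congr 1
    have : ((c.toNat : Int) - 33 + 47) = (((c.toNat - 33 + 47 : Nat)) : Int) := by omega
    rw [this, show (94:Int) = ((94:Nat):Int) from rfl, PySem.Int.mod_natCast]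
    omega
  · rw [PySem.Dict.getD_eq_get?_getD, rot47Trans_get_out _ h, Option.getD_none]

-- ===== VERDICT (by name: the statement is the Claim_ definition above) =====
theorem rot47_encoder_decoder_spec : Claim_equal_rot47_encoder_decoder := by
  intro text _
  unfold Spec_rot47_encoder_decoder rot47_encoder_decoder rot47_encoder_decoder_alt
  congr 1
  rw [show (fun (result : List Char) (char : Char) =>
      let o : Int := (char.toNat : Int)
      if 33 ≤ o ∧ o ≤ 126 then
        result ++ [Char.ofNat (33 + (PySem.Int.mod (o - 33 + 47) 94)).toNat]
      else result ++ [char])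
    = (fun result char => result ++
        [if 33 ≤ (char.toNat : Int) ∧ (char.toNat : Int) ≤ 126 then
          Char.ofNat (33 + (PySem.Int.mod ((char.toNat : Int) - 33 + 47) 94)).toNat
        else char]) from by funext r c; dsimp only; split_ifs <;> rfl]
  rw [PySem.List.foldl_append_singleton_eq_map]
  exact (List.map_congr_left (fun c _ => by rw [rot47_char c])).symm
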